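-- pv_equiv track=rewrite | github.com/Lucas-Guimaraes/Reddit-Daily-Programmer | Easy Problems/361-370/365easy.py | up_arrow_notation
-- ===== SOURCE A (Python) =====
-- def up_arrow_notation(i, arrow, m):
--     if arrow == 1:
--         return i ** m
--     elif m == 0:
--         return 1
--     else:
--         i = i ** m
--         return up_arrow_notation(i, arrow - 1, m)
-- ===== SOURCE B (Python) =====
-- def up_arrow_notation(i, arrow, m):
--     # Closed form: repeatedly raising to the m-th power arrow times
--     # multiplies the exponent by m each round, so the result is i**(m**arrow);
--     # when m == 0 every branch of the recursion yields 1.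
--     if m == 0:
--         return 1
--     return i ** (m ** arrow)
-- ===== Notes on version B (the rewrite author's own statement) =====
-- stated objective: simpler
-- what changed: Replaces the arrow-deep recursion that re-exponentiates the accumulated base each step with the closed form i ** (m ** arrow) (and 1 when m == 0); Pre_ excludes m < 0, where A returns a float or raises ZeroDivisionError instead of an int, and arrow <= 0 with m != 0, where A recurses forever (RecursionError).
import Mathlib
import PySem

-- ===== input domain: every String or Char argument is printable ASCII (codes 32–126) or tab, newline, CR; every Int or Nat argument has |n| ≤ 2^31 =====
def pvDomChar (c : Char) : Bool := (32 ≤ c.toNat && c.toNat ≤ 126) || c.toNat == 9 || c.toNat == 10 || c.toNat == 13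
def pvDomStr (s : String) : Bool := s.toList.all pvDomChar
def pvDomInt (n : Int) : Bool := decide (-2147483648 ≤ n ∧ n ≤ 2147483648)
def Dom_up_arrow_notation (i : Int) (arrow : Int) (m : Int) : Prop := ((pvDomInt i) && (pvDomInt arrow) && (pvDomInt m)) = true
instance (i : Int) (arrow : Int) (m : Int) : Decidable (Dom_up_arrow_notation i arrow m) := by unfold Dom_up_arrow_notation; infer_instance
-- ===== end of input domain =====

-- B replaces A's arrow-deep recursion by the closed form i ** (m ** arrow) (1 when m == 0); same value wherever A returns an int.


-- ===== PORT A =====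
-- Port of Python's builtin `b ** e` for a nonnegative exponent (b ** e = pvPow b e.toNat);
-- binary exponentiation so that #eval works at log depth; proved equal to `b ^ e` below.
def pvPow (b : Int) (e : Nat) : Int :=
  if h : e = 0 then 1
  else
    let half := pvPow (b * b) (e / 2)
    if e % 2 = 1 then half * b else half
decreasing_by exact Nat.div_lt_self (Nat.pos_of_ne_zero h) one_lt_two

-- Literal port of A's recursion; the fuel argument only makes the (Python-divergent or
-- float-returning, hence outside Pre_) cases total: inside Pre_ it never runs out.
-- i ** m is ported as pvPow i m.toNat, exact for m ≥ 0 (m < 0 gives a Python float, outside Pre_).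
def pvUpAux (fuel : Nat) (i : Int) (arrow : Int) (m : Int) : Int :=
  match fuel with
  | 0 => 0
  | fuel + 1 =>
    if arrow = 1 then pvPow i m.toNat
    else if m = 0 then 1
    else pvUpAux fuel (pvPow i m.toNat) (arrow - 1) m

def up_arrow_notation (i : Int) (arrow : Int) (m : Int) : Int :=
  pvUpAux (arrow.toNat + 1) i arrow m

-- ===== PORT B =====
def up_arrow_notation_alt (i : Int) (arrow : Int) (m : Int) : Int :=
  if m = 0 then 1 else pvPow i (pvPow m arrow.toNat).toNat

-- ===== PRECONDITION & SPEC =====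
-- Pre_ excludes m < 0, where A returns a Python float (or raises ZeroDivisionError), not an int,
-- and arrow ≤ 0 with m ≠ 0, where A recurses forever (RecursionError). It admits every input
-- on which A returns an int.
def Pre_up_arrow_notation (i : Int) (arrow : Int) (m : Int) : Prop :=
  0 ≤ m ∧ (m = 0 ∨ 1 ≤ arrow)
instance (i : Int) (arrow : Int) (m : Int) : Decidable (Pre_up_arrow_notation i arrow m) := by
  unfold Pre_up_arrow_notation; infer_instance

def pvWitness_up_arrow_notation : Int × Int × Int := (2, 2, 3)

def Spec_up_arrow_notation (i : Int) (arrow : Int) (m : Int) (out : Int) : Prop := out = up_arrow_notation_alt i arrow m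
instance (i : Int) (arrow : Int) (m : Int) (out : Int) : Decidable (Spec_up_arrow_notation i arrow m out) := by unfold Spec_up_arrow_notation; infer_instance

-- ===== CLAIM (what is proved, stated in full; the proofs are below) =====
def Claim_equal_up_arrow_notation : Prop := ∀ (i : Int) (arrow : Int) (m : Int), Dom_up_arrow_notation i arrow m → Pre_up_arrow_notation i arrow m → Spec_up_arrow_notation i arrow m (up_arrow_notation i arrow m)

-- ===== LEMMAS AND PROOFS =====
lemma pvPow_eq (b : Int) (e : Nat) : pvPow b e = b ^ e := by
  induction e using Nat.strong_induction_on generalizing b with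
  | _ e ih =>
    rw [pvPow]
    by_cases h : e = 0
    · simp [h]
    · rw [dif_neg h]
      have hdiv : e / 2 < e := Nat.div_lt_self (Nat.pos_of_ne_zero h) one_lt_two
      rw [show pvPow (b * b) (e / 2) = (b * b) ^ (e / 2) from ih (e / 2) hdiv (b * b), mul_pow]
      by_cases hm : e % 2 = 1
      · rw [if_pos hm, ← pow_add]
        have he : e = e / 2 + e / 2 + 1 := by omega
        conv_rhs => rw [he]
        rw [pow_succ]
      · rw [if_neg hm, ← pow_add]
        congr 1
        omega

lemma pvToNat_pow (m : Int) (h : 0 ≤ m) (k : Nat) : (m ^ k).toNat = m.toNat ^ k := by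
  induction k with
  | zero => simp
  | succ k ih =>
      rw [pow_succ, pow_succ, Int.toNat_mul (pow_nonneg h k) h, ih]

lemma pvUpAux_key (n : Nat) : ∀ (i m : Int), 1 ≤ m → ∀ fuel, n + 1 ≤ fuel →
    pvUpAux fuel i ((n : Int) + 1) m = i ^ (m.toNat ^ (n + 1)) := by
  induction n with
  | zero =>
      intro i m hm fuel hf
      match fuel, hf with
      | fuel + 1, _ => simp [pvUpAux, pvPow_eq]
  | succ n ih =>
      intro i m hm fuel hf
      match fuel, hf with
      | fuel + 1, hf =>
        have harrow : (((n + 1 : Nat) : Int) + 1) ≠ 1 := by push_cast; omega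
        have hm0 : m ≠ 0 := by omega
        have hstep : (((n + 1 : Nat) : Int) + 1) - 1 = (n : Int) + 1 := by push_cast; ring
        calc pvUpAux (fuel + 1) i (((n + 1 : Nat) : Int) + 1) m
            = pvUpAux fuel (pvPow i m.toNat) ((n : Int) + 1) m := by
              simp only [pvUpAux]; rw [if_neg harrow, if_neg hm0, hstep]
          _ = (i ^ m.toNat) ^ (m.toNat ^ (n + 1)) := by
              rw [pvPow_eq]; exact ih (i ^ m.toNat) m hm fuel (by omega)
          _ = i ^ (m.toNat ^ (n + 1 + 1)) := by rw [← pow_mul, ← pow_succ']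

theorem up_arrow_notation_spec : Claim_equal_up_arrow_notation := by
  intro i arrow m _ ⟨hm, hcase⟩
  unfold Spec_up_arrow_notation up_arrow_notation up_arrow_notation_alt
  rcases hcase with hm0 | harrow
  · -- m = 0
    subst hm0
    by_cases h1 : arrow = 1 <;> simp [pvUpAux, pvPow_eq, h1]
  · -- 1 ≤ arrow
    have hm0 : m ≠ 0 ∨ m = 0 := by omega
    rcases hm0 with hm0 | hm0
    · have hm1 : 1 ≤ m := by omega
      obtain ⟨n, hn⟩ : ∃ n : Nat, arrow = (n : Int) + 1 := ⟨(arrow - 1).toNat, by omega⟩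
      subst hn
      have htn : ((n : Int) + 1).toNat = n + 1 := by omega
      rw [htn, pvUpAux_key n i m hm1 (n + 1 + 1) (by omega), if_neg hm0,
        pvPow_eq, pvPow_eq, pvToNat_pow m hm (n + 1)]
    · subst hm0
      by_cases h1 : arrow = 1 <;> simp [pvUpAux, pvPow_eq, h1]
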